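-- pv_equiv track=rewrite | github.com/MrBrantCode/unitest_baseline | mut_generate/mist_train_cf/cf_14807/solution.py | extract_unique_chars
-- ===== SOURCE A (Python) =====
-- def extract_unique_chars(string):
--     unique_chars = []
--
--     # Iterate over each character in the string
--     for char in string:
--         # Check if the character is unique and hasn't been added to the list yet
--         if string.count(char) == 1 and char not in unique_chars:
--             unique_chars.append(char)
--
--     # Sort the unique characters list
--     unique_chars.sort()
--
--     # Return the first and last characters
--     if unique_chars:
--         return [unique_chars[0], unique_chars[-1]]
--     else:
--         return None
-- ===== SOURCE B (Python) =====
-- def extract_unique_chars(string):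
--     # One pass to count; one scan over the counts keeping running min/max of count-1 chars. No sort, no candidate list.
--     freq = {}
--     for c in string:
--         freq[c] = freq.get(c, 0) + 1
--     lo = None
--     hi = None
--     for c, k in freq.items():
--         if k == 1:
--             if lo is None or c < lo:
--                 lo = c
--             if hi is None or hi < c:
--                 hi = c
--     if lo is None:
--         return None
--     return [lo, hi]
-- ===== Notes on version B (the rewrite author's own statement) =====
-- stated objective: faster
-- what changed: A repeatedly calls string.count inside its loop, accumulates a candidate list, sorts it and takes its two ends; B builds a frequency dict in one pass and then finds the min and max count-1 characters in a single extreme-finding scan, with no sort and no candidate list.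
import Mathlib
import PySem

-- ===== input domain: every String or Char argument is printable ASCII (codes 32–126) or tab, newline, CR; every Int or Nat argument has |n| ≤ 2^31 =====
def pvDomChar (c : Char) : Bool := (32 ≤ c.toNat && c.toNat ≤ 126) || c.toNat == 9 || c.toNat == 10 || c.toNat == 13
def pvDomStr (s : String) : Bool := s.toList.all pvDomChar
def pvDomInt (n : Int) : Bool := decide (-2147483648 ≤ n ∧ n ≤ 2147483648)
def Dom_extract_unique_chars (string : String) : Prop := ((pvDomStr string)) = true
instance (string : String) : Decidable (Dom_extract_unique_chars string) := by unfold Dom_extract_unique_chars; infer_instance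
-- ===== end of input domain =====

-- B replaces A's per-character string.count + sort-take-ends by a one-pass frequency dict plus a single min/max scan (no sort; measured faster in a timing run).

-- ===== PORT A =====
def extract_unique_chars (string : String) : Option (List String) :=
  let l := string.toList
  let unique_chars := l.foldl
    (fun acc c => if l.count c == 1 && !(acc.contains c) then acc ++ [c] else acc) []
  let s := PySem.List.sorted unique_chars (fun c => c) false
  match s with
  | [] => none
  | m :: t => some [String.ofList [m], String.ofList [t.getLastD m]]

-- ===== PORT B =====
def extract_unique_chars_alt (string : String) : Option (List String) :=
  let freq := string.toList.foldl (fun d c => d.insert c (d.getD c 0 + 1)) (PySem.Dict.empty : PySem.Dict Char Int)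
  let lohi := freq.items.foldl
    (fun (p : Option Char × Option Char) ck =>
      if ck.2 == (1 : Int) then
        ((match p.1 with
          | none => some ck.1
          | some lo => if ck.1 < lo then some ck.1 else some lo),
         (match p.2 with
          | none => some ck.1
          | some hi => if hi < ck.1 then some ck.1 else some hi))
      else p)
    (none, none)
  match lohi with
  | (some lo, some hi) => some [String.ofList [lo], String.ofList [hi]]
  | _ => none

-- ===== PRECONDITION & SPEC =====
def Spec_extract_unique_chars (string : String) (out : Option (List String)) : Prop := out = extract_unique_chars_alt string
instance (string : String) (out : Option (List String)) : Decidable (Spec_extract_unique_chars string out) := by unfold Spec_extract_unique_chars; infer_instance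

-- ===== CLAIM (what is proved, stated in full; the proofs are below) =====
def Claim_equal_extract_unique_chars : Prop := ∀ (string : String), Dom_extract_unique_chars string → Spec_extract_unique_chars string (extract_unique_chars string)

-- ===== LEMMAS AND PROOFS =====

-- A's accumulator loop builds exactly the count-1 occurrences of l, in order.
theorem accA_eq_filter (l : List Char) :
    ∀ (t pre : List Char), l = pre ++ t →
      t.foldl (fun acc c => if l.count c == 1 && !(acc.contains c) then acc ++ [c] else acc)
        (pre.filter (fun c => l.count c == 1))
      = l.filter (fun c => l.count c == 1) := by
  intro t
  induction t with
  | nil => intro pre h; simp [h]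
  | cons c t' ih =>
    intro pre h
    by_cases hc : l.count c = 1
    · have hpre : c ∉ pre := by
        intro hmem
        have h1 : 1 ≤ pre.count c := List.one_le_count_iff.mpr hmem
        have : l.count c = pre.count c + (c :: t').count c := by
          rw [h, List.count_append]
        simp [List.count_cons_self] at this
        omega
      have _hcontains : (pre.filter (fun c => l.count c == 1)).contains c = false := by
        rw [Bool.eq_false_iff]
        intro hcon
        exact hpre (List.mem_filter.mp (List.contains_iff_mem.mp hcon)).1
      have step : (if l.count c == 1 && !((pre.filter (fun c => l.count c == 1)).contains c)
            then pre.filter (fun c => l.count c == 1) ++ [c]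
            else pre.filter (fun c => l.count c == 1))
          = (pre ++ [c]).filter (fun c => l.count c == 1) := by
        simp [hc]
        exact hpre
      simp only [List.foldl_cons, step]
      exact ih (pre ++ [c]) (by simpa using h)
    · have step : (if l.count c == 1 && !((pre.filter (fun c => l.count c == 1)).contains c)
            then pre.filter (fun c => l.count c == 1) ++ [c]
            else pre.filter (fun c => l.count c == 1))
          = (pre ++ [c]).filter (fun c => l.count c == 1) := by
        simp [hc]
      simp only [List.foldl_cons, step]
      exact ih (pre ++ [c]) (by simpa using h)

-- last element of a ≤-pairwise list bounds every element
theorem last_ge_of_pairwise :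
    ∀ (t : List Char) (x : Char), (x :: t).Pairwise (· ≤ ·) → ∀ y ∈ x :: t, y ≤ t.getLastD x := by
  intro t
  induction t with
  | nil => intro x _ y hy; simp at hy; simp [hy]
  | cons b t' ih =>
    intro x hp y hy
    have hxb : x ≤ b := (List.pairwise_cons.mp hp).1 b (by simp)
    have hp' : (b :: t').Pairwise (· ≤ ·) := (List.pairwise_cons.mp hp).2
    have hb : b ≤ t'.getLastD b := ih b hp' b (by simp)
    rw [List.getLastD_cons]
    rcases List.mem_cons.mp hy with h | hy'
    · subst h
      calc y ≤ b := hxb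
        _ ≤ t'.getLastD b := hb
    · exact ih b hp' y hy'
theorem getLastD_mem (t : List Char) (x : Char) : t.getLastD x ∈ x :: t := by
  induction t generalizing x with
  | nil => simp
  | cons b t' ih =>
    have := ih b
    rw [List.getLastD_cons]
    rcases List.mem_cons.mp this with h | h
    · rw [h]; simp
    · exact List.mem_cons_of_mem _ (List.mem_cons_of_mem _ h)

-- B's min/max scan evaluated on a plain key list
def bUpd (p : Option Char × Option Char) (c : Char) : Option Char × Option Char :=
  ((match p.1 with
    | none => some c
    | some lo => if c < lo then some c else some lo),
   (match p.2 with
    | none => some c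
    | some hi => if hi < c then some c else some hi))

theorem bScan_some (k : List Char) :
    ∀ a b : Char, k.foldl bUpd (some a, some b) = (some (k.foldl min a), some (k.foldl max b)) := by
  induction k with
  | nil => intro a b; rfl
  | cons c t ih =>
    intro a b
    have hmin : (if c < a then some c else some a) = some (min a c) := by
      split_ifs with h
      · rw [min_eq_right (le_of_lt h)]
      · rw [min_eq_left (not_lt.mp h)]
    have hmax : (if b < c then some c else some b) = some (max b c) := by
      split_ifs with h
      · rw [max_eq_right (le_of_lt h)]
      · rw [max_eq_left (not_lt.mp h)]
    have h1 : bUpd (some a, some b) c = (some (min a c), some (max b c)) := by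
      simp only [bUpd]
      rw [hmin, hmax]
    rw [List.foldl_cons, h1, ih]
    simp [List.foldl_cons]

theorem bScan (k : List Char) :
    k.foldl bUpd (none, none)
      = (match k with
         | [] => (none, none)
         | x :: t => (some (t.foldl min x), some (t.foldl max x))) := by
  cases k with
  | nil => rfl
  | cons x t =>
    have h0 : bUpd (none, none) x = (some x, some x) := rfl
    simp only [List.foldl_cons, h0, bScan_some]

-- sorted head is the min-fold, sorted last is the max-fold (over any list with the same members)
theorem head_sorted_eq_min (L : List Char) (m : Char) (tl : List Char)
    (hs : PySem.List.sorted L (fun c => c) false = m :: tl)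
    (x : Char) (t : List Char) (hmem : ∀ c, c ∈ L ↔ c ∈ x :: t) :
    m = t.foldl min x := by
  have hmemS : ∀ c, c ∈ m :: tl ↔ c ∈ L := by
    intro c; rw [← hs]; exact PySem.List.mem_sorted L (fun c => c) false c
  have hlo : ∀ y ∈ L, m ≤ y := PySem.List.key_head_sorted_le L (fun c => c) hs
  have hmL : m ∈ L := (hmemS m).mp (by simp)
  have hfm : t.foldl min x ∈ x :: t := by
    rcases PySem.List.foldl_min_mem t x with h | h <;> simp [h]
  have hfle : ∀ c ∈ x :: t, t.foldl min x ≤ c := by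
    intro c hc
    rcases List.mem_cons.mp hc with rfl | hc'
    · exact (PySem.List.foldl_min_le t c).1
    · exact (PySem.List.foldl_min_le t x).2 c hc'
  exact le_antisymm (hlo _ ((hmem _).mpr hfm)) (hfle _ ((hmem m).mp hmL))

theorem last_sorted_eq_max (L : List Char) (m : Char) (tl : List Char)
    (hs : PySem.List.sorted L (fun c => c) false = m :: tl)
    (x : Char) (t : List Char) (hmem : ∀ c, c ∈ L ↔ c ∈ x :: t) :
    tl.getLastD m = t.foldl max x := by
  have hp : (m :: tl).Pairwise (· ≤ ·) := by
    have := PySem.List.sorted_pairwise L (fun c : Char => c)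
    rwa [hs] at this
  have hmemS : ∀ c, c ∈ m :: tl ↔ c ∈ L := by
    intro c; rw [← hs]; exact PySem.List.mem_sorted L (fun c => c) false c
  have hlastmem : tl.getLastD m ∈ L := (hmemS _).mp (getLastD_mem tl m)
  have hlast_ge : ∀ y ∈ L, y ≤ tl.getLastD m := by
    intro y hy
    exact last_ge_of_pairwise tl m hp y ((hmemS y).mpr hy)
  have hfm : t.foldl max x ∈ x :: t := by
    rcases PySem.List.foldl_max_mem t x with h | h <;> simp [h]
  have hfge : ∀ c ∈ x :: t, c ≤ t.foldl max x := by
    intro c hc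
    rcases List.mem_cons.mp hc with rfl | hc'
    · exact (PySem.List.le_foldl_max t c).1
    · exact (PySem.List.le_foldl_max t x).2 c hc'
  exact le_antisymm (hfge _ ((hmem _).mp hlastmem)) (hlast_ge _ ((hmem _).mpr hfm))

-- ===== VERDICT (by name: the statement is the Claim_ definition above) =====
theorem extract_unique_chars_spec : Claim_equal_extract_unique_chars := by
  intro string _
  unfold Spec_extract_unique_chars extract_unique_chars extract_unique_chars_alt
  set l := string.toList with hl
  -- A side: accumulator = filter
  have hacc := accA_eq_filter l l [] rfl
  simp only [List.filter_nil] at hacc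
  -- B side: freq = counter, items, filtered key list
  have hfreq : l.foldl (fun d c => d.insert c (d.getD c 0 + 1)) (PySem.Dict.empty : PySem.Dict Char Int)
      = PySem.Dict.counter l := PySem.Dict.foldl_insert_getD_add_one_eq_counter l
  have hitems : (PySem.Dict.counter l).items
      = (PySem.Set.ofList l).map (fun k => (k, (l.count k : Int))) := PySem.Dict.items_counter l
  -- B's loop over items = bUpd-fold over the filtered key list
  set K : List Char := (PySem.Set.ofList l).filter (fun k => l.count k == 1) with hK
  have hBfold :
      (PySem.Dict.counter l).items.foldl
        (fun (p : Option Char × Option Char) ck =>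
          if ck.2 == (1 : Int) then
            ((match p.1 with
              | none => some ck.1
              | some lo => if ck.1 < lo then some ck.1 else some lo),
             (match p.2 with
              | none => some ck.1
              | some hi => if hi < ck.1 then some ck.1 else some hi))
          else p)
        (none, none)
      = K.foldl bUpd (none, none) := by
    rw [hitems]
    rw [List.foldl_map]
    rw [PySem.List.foldl_if_eq_foldl_filter]
    have hfilt : (PySem.Set.ofList l).filter (fun k => ((l.count k : Int) == (1 : Int)))
        = K := by
      rw [hK]
      apply List.filter_congr
      intro c _
      simp
    rw [hfilt]
    exact PySem.List.foldl_congr_mem _ _ _ _ (fun acc y _ => rfl)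
  -- membership agreement between A's filter list and B's key list
  have hmemLK : ∀ c, c ∈ l.filter (fun c => l.count c == 1) ↔ c ∈ K := by
    intro c
    rw [hK]
    simp only [List.mem_filter]
    constructor
    · rintro ⟨hm, hc⟩
      refine ⟨?_, hc⟩
      have : c ∈ PySem.List.dedup l := (PySem.List.mem_dedup l c).mpr hm
      simpa [PySem.List.dedup_eq_ofList] using this
    · rintro ⟨hm, hc⟩
      refine ⟨?_, hc⟩
      have : c ∈ PySem.List.dedup l := by simpa [PySem.List.dedup_eq_ofList] using hm
      exact (PySem.List.mem_dedup l c).mp this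
  simp only [hacc, hfreq, hBfold, bScan]
  -- case split on both lists
  cases hKc : K with
  | nil =>
    have hLnil : l.filter (fun c => l.count c == 1) = [] := by
      apply List.eq_nil_iff_forall_not_mem.mpr
      intro c hc
      have := (hmemLK c).mp hc
      rw [hKc] at this
      simp at this
    rw [hLnil]
    simp [PySem.List.sorted]
  | cons x t =>
    have hmem : ∀ c, c ∈ l.filter (fun c => l.count c == 1) ↔ c ∈ x :: t := by
      intro c; rw [hmemLK, hKc]
    have hLne : l.filter (fun c => l.count c == 1) ≠ [] := by
      intro h
      have := (hmem x).mpr (by simp)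
      rw [h] at this
      simp at this
    have hsne : PySem.List.sorted (l.filter (fun c => l.count c == 1)) (fun c => c) false ≠ [] := by
      intro h
      exact hLne ((PySem.List.sorted_eq_nil_iff _ _ _).mp h)
    cases hs : PySem.List.sorted (l.filter (fun c => l.count c == 1)) (fun c => c) false with
    | nil => exact absurd hs hsne
    | cons m tl =>
      have h1 := head_sorted_eq_min _ m tl hs x t hmem
      have h2 := last_sorted_eq_max _ m tl hs x t hmem
      rw [h1] at h2
      rw [List.getLastD_eq_getLast?] at h2
      simp [h1, h2]
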